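-- pv_equiv track=rewrite | github.com/kysrc/ky_mas | feature_selection_timeseries/src/models/utils.py | generate_val_splits
-- ===== SOURCE A (Python) =====
-- def generate_val_splits(train_start, train_end, test_size, num_splits):
--     """
--     Generates training and validation indices for a specified number of splits.
--     Args:
--         train_start (int): Starting index of the training set.
--         train_end (int): Ending index of the training set.
--         test_size (int): Size of the test set.
--         num_splits (int): Number of splits.
--     Returns:
--         tuple: Two lists containing training and validation indices for each split.
--     """
--     train_indices = []
--     val_indices = []
--
--     train_size = (train_end - train_start - test_size) // num_splits
--
--     for i in range(num_splits):
--         if i == 0: # Add remainder to the starting train index only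
--             remainder = (train_end - train_start - test_size) % num_splits
--             train_start += remainder
--             current_train_start = train_start + i * train_size
--         else:
--             current_train_start = train_indices[-1][1]
--
--         #current_train_end = current_train_start + train_size
--         current_train_end = current_train_start + train_size
--         train_indices.append([current_train_start, current_train_end])
--         #val_start = current_train_end
--         val_start = current_train_start + train_size
--         val_end = current_train_end + test_size
--         val_indices.append([val_start, val_end])
--
--     return train_indices, val_indices
-- ===== SOURCE B (Python) =====
-- def generate_val_splits(train_start, train_end, test_size, num_splits):
--     # Build the splits BACK-TO-FRONT from the fixed right edge train_end - test_size,
--     # then reverse; no remainder computation, no i==0 special case, no back-reference.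
--     train_size = (train_end - train_start - test_size) // num_splits
--     train_indices = []
--     val_indices = []
--     end = train_end - test_size
--     for _ in range(num_splits):
--         train_indices.append([end - train_size, end])
--         val_indices.append([end, end + test_size])
--         end -= train_size
--     train_indices.reverse()
--     val_indices.reverse()
--     return train_indices, val_indices
-- ===== Notes on version B (the rewrite author's own statement) =====
-- stated objective: alternative
-- what changed: Builds the splits recursively back-to-front from the fixed right edge train_end - test_size, subtracting train_size each step; A's forward loop with the i==0 remainder special case and the back-reference to train_indices[-1][1] disappears (no remainder is ever computed).
import Mathlib
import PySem

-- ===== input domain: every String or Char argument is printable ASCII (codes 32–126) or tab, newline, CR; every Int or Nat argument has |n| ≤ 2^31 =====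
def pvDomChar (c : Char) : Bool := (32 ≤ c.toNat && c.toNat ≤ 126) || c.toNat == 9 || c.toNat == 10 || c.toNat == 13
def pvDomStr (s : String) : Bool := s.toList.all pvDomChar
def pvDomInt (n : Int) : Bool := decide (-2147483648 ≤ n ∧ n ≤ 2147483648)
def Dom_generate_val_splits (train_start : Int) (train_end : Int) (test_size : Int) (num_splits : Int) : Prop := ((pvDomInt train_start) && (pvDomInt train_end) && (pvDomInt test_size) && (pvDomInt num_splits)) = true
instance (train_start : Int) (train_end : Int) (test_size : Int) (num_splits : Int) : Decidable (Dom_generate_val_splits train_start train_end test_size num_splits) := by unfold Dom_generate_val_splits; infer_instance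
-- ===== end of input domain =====

-- B builds the splits recursively back-to-front from the fixed right edge
-- train_end - test_size (no remainder, no accumulator); objective: alternative.

-- ===== PORT A =====
-- loop body of A; state = (train_indices, val_indices, train_start).
-- In the i ≠ 0 branch Python reads train_indices[-1][1]; in A this access is always
-- in range (the i = 0 iteration has already appended a 2-element list), so the
-- `.getD` defaults below are unreachable and the port is exact.
def genA_step (train_end : Int) (test_size : Int) (train_size : Int) (num_splits : Int)
    (state : List (List Int) × List (List Int) × Int) (i : Int) :
    List (List Int) × List (List Int) × Int :=
  let tr := state.1
  let vl := state.2.1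
  let st := state.2.2
  let stcur : Int × Int :=
    if i == 0 then
      let remainder := PySem.Int.mod (train_end - st - test_size) num_splits
      let st' := st + remainder
      (st', st' + i * train_size)
    else
      (st, (PySem.List.pyGet? ((PySem.List.pyGet? tr (-1)).getD []) 1).getD 0)
  let current_train_start := stcur.2
  let current_train_end := current_train_start + train_size
  let val_start := current_train_start + train_size
  let val_end := current_train_end + test_size
  (tr ++ [[current_train_start, current_train_end]], vl ++ [[val_start, val_end]], stcur.1)

def generate_val_splits (train_start : Int) (train_end : Int) (test_size : Int) (num_splits : Int) : List (List Int) × List (List Int) :=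
  let train_size := PySem.Int.floordiv (train_end - train_start - test_size) num_splits
  let fin := (PySem.List.pyRange 0 num_splits 1).foldl
    (genA_step train_end test_size train_size num_splits) ([], [], train_start)
  (fin.1, fin.2.1)

-- ===== PORT B =====
-- Source B's loop body; state = (train_indices, val_indices, end).
def genB_step (train_size : Int) (test_size : Int)
    (state : List (List Int) × List (List Int) × Int) (_i : Int) :
    List (List Int) × List (List Int) × Int :=
  (state.1 ++ [[state.2.2 - train_size, state.2.2]],
   state.2.1 ++ [[state.2.2, state.2.2 + test_size]],
   state.2.2 - train_size)

def generate_val_splits_alt (train_start : Int) (train_end : Int) (test_size : Int) (num_splits : Int) : List (List Int) × List (List Int) :=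
  let train_size := PySem.Int.floordiv (train_end - train_start - test_size) num_splits
  let fin := (PySem.List.pyRange 0 num_splits 1).foldl
    (genB_step train_size test_size) ([], [], train_end - test_size)
  (fin.1.reverse, fin.2.1.reverse)

-- ===== PRECONDITION & SPEC =====
-- Python A raises ZeroDivisionError when num_splits == 0 (so does B); that is the only excluded input.
def Pre_generate_val_splits (train_start : Int) (train_end : Int) (test_size : Int) (num_splits : Int) : Prop := num_splits ≠ 0
instance (train_start : Int) (train_end : Int) (test_size : Int) (num_splits : Int) : Decidable (Pre_generate_val_splits train_start train_end test_size num_splits) := by unfold Pre_generate_val_splits; infer_instance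
def pvWitness_generate_val_splits : Int × Int × Int × Int := (0, 23, 3, 4)

def Spec_generate_val_splits (train_start : Int) (train_end : Int) (test_size : Int) (num_splits : Int) (out : List (List Int) × List (List Int)) : Prop := out = generate_val_splits_alt train_start train_end test_size num_splits
instance (train_start : Int) (train_end : Int) (test_size : Int) (num_splits : Int) (out : List (List Int) × List (List Int)) : Decidable (Spec_generate_val_splits train_start train_end test_size num_splits out) := by unfold Spec_generate_val_splits; infer_instance

-- ===== CLAIM (what is proved, stated in full; the proofs are below) =====
def Claim_equal_generate_val_splits : Prop := ∀ (train_start : Int) (train_end : Int) (test_size : Int) (num_splits : Int), Dom_generate_val_splits train_start train_end test_size num_splits → Pre_generate_val_splits train_start train_end test_size num_splits → Spec_generate_val_splits train_start train_end test_size num_splits (generate_val_splits train_start train_end test_size num_splits)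

-- ===== LEMMAS AND PROOFS =====

lemma pyGet_append_neg_one {α : Type} (xs : List α) (x : α) :
    PySem.List.pyGet? (xs ++ [x]) (-1) = some x := by
  simp [PySem.List.pyGet?, PySem.List.pyIdx?]

-- A's fold over [0, 1, …, n-1] computed in closed form.
lemma foldA_range (train_end test_size train_start train_size num_splits : Int) :
    ∀ n : Nat, 1 ≤ n →
    (List.map (fun k : Nat => (k : Int)) (List.range n)).foldl
        (genA_step train_end test_size train_size num_splits) ([], [], train_start)
      = (List.map (fun k : Nat =>
            [train_start + PySem.Int.mod (train_end - train_start - test_size) num_splits + (k : Int) * train_size,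
             train_start + PySem.Int.mod (train_end - train_start - test_size) num_splits + ((k : Int) + 1) * train_size]) (List.range n),
         List.map (fun k : Nat =>
            [train_start + PySem.Int.mod (train_end - train_start - test_size) num_splits + ((k : Int) + 1) * train_size,
             train_start + PySem.Int.mod (train_end - train_start - test_size) num_splits + ((k : Int) + 1) * train_size + test_size]) (List.range n),
         train_start + PySem.Int.mod (train_end - train_start - test_size) num_splits) := by
  intro n hn
  induction n with
  | zero => omega
  | succ m ih =>
    rcases Nat.eq_zero_or_pos m with hm | hm
    · subst hm
      simp [genA_step]
    · have hstep := ih hm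
      rw [List.range_succ, List.map_append, List.foldl_append, hstep]
      obtain ⟨p, hp⟩ : ∃ p, m = p + 1 := ⟨m - 1, by omega⟩
      subst hp
      rw [show List.range (p + 1) = List.range p ++ [p] from List.range_succ]
      simp only [List.map_append, List.map_cons, List.map_nil, List.foldl_cons,
        List.foldl_nil, genA_step, pyGet_append_neg_one, Option.getD_some]
      have hcond : ¬ ((p : Int) + 1 = 0) := by omega
      simp [PySem.List.pyGet?, PySem.List.pyIdx?, hcond]
      all_goals first
        | omega
        | ring

-- B's fold over any n-element index list computed in closed form.
lemma foldB_closed (train_size test_size end0 : Int) (l : List Int) :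
    l.foldl (genB_step train_size test_size) ([], [], end0)
      = (List.map (fun k : Nat =>
            [end0 - ((k : Int) + 1) * train_size, end0 - (k : Int) * train_size]) (List.range l.length),
         List.map (fun k : Nat =>
            [end0 - (k : Int) * train_size, end0 - (k : Int) * train_size + test_size]) (List.range l.length),
         end0 - (l.length : Int) * train_size) := by
  induction l using List.reverseRecOn with
  | nil => simp
  | append_singleton xs x ih =>
    rw [List.foldl_append, ih]
    simp only [List.foldl_cons, List.foldl_nil, genB_step, List.length_append,
      List.length_cons, List.length_nil, List.range_succ, List.map_append, List.map_cons,
      List.map_nil, Prod.mk.injEq, List.append_cancel_left_eq]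
    refine ⟨?_, ?_, ?_⟩ <;> push_cast <;> ring_nf

-- reversing a map over range flips the index.
lemma rev_map_range {α : Type} (f : Nat → α) :
    ∀ n : Nat, (List.map f (List.range n)).reverse = List.map (fun j => f (n - 1 - j)) (List.range n) := by
  intro n
  induction n generalizing f with
  | zero => simp
  | succ m ih =>
    have hL : (List.map f (List.range (m + 1))).reverse
        = f m :: (List.map f (List.range m)).reverse := by
      rw [List.range_succ]; simp
    rw [hL, ih, List.range_succ_eq_map]
    simp only [List.map_cons, List.map_map, List.cons.injEq]
    refine ⟨by norm_num, ?_⟩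
    apply List.map_congr_left
    intro j hj
    have hjm : j < m := List.mem_range.mp hj
    simp only [Function.comp]
    congr 1
    omega

-- ===== VERDICT (by name: the statement is the Claim_ definition above) =====
theorem generate_val_splits_spec : Claim_equal_generate_val_splits := by
  intro ts te tz ns _ hpre
  unfold Spec_generate_val_splits generate_val_splits generate_val_splits_alt
  rcases lt_trichotomy ns 0 with hneg | hzero | hpos
  · have hr : PySem.List.pyRange 0 ns 1 = [] := by
      simp [PySem.List.pyRange]
      omega
    simp [hr]
  · exact absurd hzero hpre
  · obtain ⟨n, hn⟩ : ∃ n : Nat, ns = (n : Int) := ⟨ns.toNat, by omega⟩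
    subst hn
    have hn1 : 1 ≤ n := by exact_mod_cast hpos
    rw [PySem.List.pyRange_zero_natCast n]
    dsimp only
    set tsz := PySem.Int.floordiv (te - ts - tz) (n : Int) with htsz
    rw [foldA_range te tz ts tsz (n : Int) n hn1]
    rw [foldB_closed]
    simp only [List.length_map, List.length_range]
    rw [rev_map_range, rev_map_range]
    set base := ts + PySem.Int.mod (te - ts - tz) (n : Int) with hbase
    have hid : te - tz = base + (n : Int) * tsz := by
      have := Int.mul_fdiv_add_fmod (te - ts - tz) (n : Int)
      simp [PySem.Int.floordiv, PySem.Int.mod, hbase, htsz] at this ⊢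
      omega
    rw [hid]
    refine Prod.ext ?_ ?_ <;> · apply List.map_congr_left
                                intro j hj
                                have hjn : j < n := List.mem_range.mp hj
                                have hc : ((n - 1 - j : Nat) : Int) = (n : Int) - 1 - (j : Int) := by omega
                                simp only [hc, List.cons.injEq, and_true]
                                constructor <;> ring
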